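-- pv_equiv track=rewrite | github.com/DRIESASTER/python_scripts_1ba | pozo_azul.py | crossSection
-- ===== SOURCE A (Python) =====
-- def crossSection(getal, lijn):
--
--     assert (len(lijn)/getal)%2 == 0, "invalid cross section"
--     lijst= []
--     for i in range(0,getal):
--         begin= i*(len(lijn)//getal)
--         eind= begin+(len(lijn)//getal)
--         zin= lijn[begin:eind]
--         lijst2= []
--         for k in range(0,len(zin),2):
--             lijst2.append(zin[k:k+2])
--         lijst.append(lijst2)
--     return lijst
-- ===== SOURCE B (Python) =====
-- def crossSection(getal, lijn):
--     assert (len(lijn)/getal)%2 == 0, "invalid cross section"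
--     seg = len(lijn)//getal
--     half = seg//2
--     pairs = [lijn[k:k+2] for k in range(0, len(lijn), 2)]
--     return [pairs[i*half:(i+1)*half] for i in range(getal)]
-- ===== Notes on version B (the rewrite author's own statement) =====
-- stated objective: alternative
-- what changed: A slices the string into getal segments and chunks each segment into pairs in a nested loop; B builds the flat list of all consecutive pairs once and then regroups it by slicing that pairs list into getal equal groups.
import Mathlib
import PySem

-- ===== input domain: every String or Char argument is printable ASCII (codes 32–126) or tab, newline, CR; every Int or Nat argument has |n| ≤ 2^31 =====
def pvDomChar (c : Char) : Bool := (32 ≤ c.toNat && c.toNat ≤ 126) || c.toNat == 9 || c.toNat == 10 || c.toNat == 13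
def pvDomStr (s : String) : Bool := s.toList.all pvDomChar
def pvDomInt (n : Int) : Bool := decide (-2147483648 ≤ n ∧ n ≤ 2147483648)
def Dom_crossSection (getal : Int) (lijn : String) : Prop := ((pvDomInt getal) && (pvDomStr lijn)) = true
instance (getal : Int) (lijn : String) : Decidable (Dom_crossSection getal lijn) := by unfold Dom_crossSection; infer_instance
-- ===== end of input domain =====

-- B regroups a flat list of consecutive pairs instead of A's segment-then-pair nested loops; same cost, different decomposition.

-- ===== PORT A =====
def crossSection (getal : Int) (lijn : String) : List (List String) :=
  (PySem.List.pyRange 0 getal 1).foldl (fun lijst i =>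
    let begin_ := i * PySem.Int.floordiv (PySem.Str.len lijn) getal
    let eind := begin_ + PySem.Int.floordiv (PySem.Str.len lijn) getal
    let zin := PySem.Str.slice lijn (some begin_) (some eind)
    let lijst2 := (PySem.List.pyRange 0 (PySem.Str.len zin) 2).foldl
      (fun l2 k => l2 ++ [PySem.Str.slice zin (some k) (some (k + 2))]) []
    lijst ++ [lijst2]) []

-- ===== PORT B =====
def crossSection_alt (getal : Int) (lijn : String) : List (List String) :=
  let seg := PySem.Int.floordiv (PySem.Str.len lijn) getal
  let half := PySem.Int.floordiv seg 2
  let pairs := (PySem.List.pyRange 0 (PySem.Str.len lijn) 2).map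
    (fun k => PySem.Str.slice lijn (some k) (some (k + 2)))
  (PySem.List.pyRange 0 getal 1).map
    (fun i => PySem.List.slice pairs (some (i * half)) (some ((i + 1) * half)))

-- ===== PRECONDITION & SPEC =====
-- Pre_ excludes exactly the inputs where A's assert fails (AssertionError) or getal = 0 (ZeroDivisionError):
-- the assert passes iff getal ≠ 0 and len(lijn)/getal is an even integer, i.e. 2*getal divides len(lijn).
def Pre_crossSection (getal : Int) (lijn : String) : Prop :=
  getal ≠ 0 ∧ (2 * getal) ∣ (lijn.toList.length : Int)
instance (getal : Int) (lijn : String) : Decidable (Pre_crossSection getal lijn) := by unfold Pre_crossSection; infer_instance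

def pvWitness_crossSection : Int × String := (2, "abcd")

def Spec_crossSection (getal : Int) (lijn : String) (out : List (List String)) : Prop := out = crossSection_alt getal lijn
instance (getal : Int) (lijn : String) (out : List (List String)) : Decidable (Spec_crossSection getal lijn out) := by unfold Spec_crossSection; infer_instance

-- ===== CLAIM (what is proved, stated in full; the proofs are below) =====
def Claim_equal_crossSection : Prop := ∀ (getal : Int) (lijn : String), Dom_crossSection getal lijn → Pre_crossSection getal lijn → Spec_crossSection getal lijn (crossSection getal lijn)

-- ===== LEMMAS AND PROOFS =====

-- python range(0, 2*m, 2)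
lemma pyRange_two_eq (m : Nat) :
    PySem.List.pyRange 0 ((2 * m : Nat) : Int) 2 = (List.range m).map (fun t => ((2 * t : Nat) : Int)) := by
  rw [PySem.List.pyRange_of_pos 0 _ (by norm_num : (0:Int) < 2)]
  have hcnt : (if (0:Int) < ((2 * m : Nat) : Int) then ((((2 * m : Nat) : Int) - 0 + 2 - 1) / 2).toNat else 0) = m := by
    split_ifs with h <;> push_cast at h ⊢ <;> omega
  rw [hcnt]
  apply List.map_congr_left
  intro t _
  push_cast
  ring

lemma foldl_snoc {α β : Type} (f : α → β) (l : List α) :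
    l.foldl (fun acc x => acc ++ [f x]) [] = l.map f := by
  rw [PySem.List.foldl_append_eq_flatMap]
  induction l with
  | nil => rfl
  | cons x xs ih => simp [List.flatMap] at *; simp [ih]

lemma map_range_drop_take {α : Type} (f : Nat → α) (N a b : Nat) (h : a + b ≤ N) :
    (((List.range N).map f).drop a).take b = (List.range b).map (fun t => f (a + t)) := by
  apply List.ext_getElem
  · simp; omega
  · intro i h1 h2
    simp

lemma toList_slice_nat (s : String) (a b : Nat) :
    (PySem.Str.slice s (some (a : Int)) (some ((a : Int) + (b : Int)))).toList
      = (s.toList.drop a).take b := by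
  rw [PySem.Str.toList_slice, PySem.Chars.slice_eq_listSlice, PySem.List.slice_natCast_add]

lemma toList_slice_nat2 (s : String) (a : Nat) :
    (PySem.Str.slice s (some (a : Int)) (some ((a : Int) + 2))).toList
      = (s.toList.drop a).take 2 := by
  have h2 : ((a : Int) + 2) = ((a : Int) + ((2 : Nat) : Int)) := by norm_num
  rw [h2, toList_slice_nat]

theorem crossSection_spec : Claim_equal_crossSection := by
  intro getal lijn _hdom hpre
  obtain ⟨hg0, c, hc⟩ := hpre
  unfold Spec_crossSection
  rcases lt_or_gt_of_ne hg0 with hneg | hpos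
  · unfold crossSection crossSection_alt
    rw [PySem.List.pyRange_one_eq_nil (by omega)]
    simp
  · obtain ⟨g, hg⟩ : ∃ g : Nat, getal = (g : Int) := ⟨getal.toNat, (Int.toNat_of_nonneg hpos.le).symm⟩
    have hgpos : 0 < g := by omega
    have hc0 : 0 ≤ c := by nlinarith [Int.natCast_nonneg lijn.toList.length]
    obtain ⟨m, hm⟩ : ∃ m : Nat, c = (m : Int) := ⟨c.toNat, (Int.toNat_of_nonneg hc0).symm⟩
    have hn : lijn.toList.length = g * (2 * m) := by
      have h1 : (lijn.toList.length : Int) = ((g * (2 * m) : Nat) : Int) := by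
        push_cast; rw [hc, hg, hm]; ring
      exact_mod_cast h1
    have hseg : PySem.Int.floordiv ((lijn.toList.length : Nat) : Int) getal = ((2 * m : Nat) : Int) := by
      rw [hg, hn, PySem.Int.floordiv_natCast]
      congr 1
      exact Nat.mul_div_cancel_left _ hgpos
    have hhalf : PySem.Int.floordiv ((2 * m : Nat) : Int) 2 = ((m : Nat) : Int) := by
      rw [PySem.Int.floordiv_eq_ediv_of_pos (by norm_num)]
      push_cast
      omega
    have hgt : (getal - 0).toNat = g := by omega
    have hA : crossSection getal lijn
        = (List.range g).map (fun k => (List.range m).map (fun t =>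
            PySem.Str.slice lijn (some ((2 * (k * m + t) : Nat) : Int))
              (some (((2 * (k * m + t) : Nat) : Int) + 2)))) := by
      simp only [crossSection, PySem.Str.len_eq, hseg, PySem.List.pyRange_one, hgt,
        foldl_snoc, List.map_map]
      apply List.map_congr_left
      intro k hk
      rw [List.mem_range] at hk
      simp only [Function.comp, zero_add]
      have e1 : ((k : Int)) * ((2 * m : Nat) : Int) = ((k * (2 * m) : Nat) : Int) := by
        push_cast; ring
      rw [e1]
      have hz : (PySem.Str.slice lijn (some ((k * (2 * m) : Nat) : Int))
          (some (((k * (2 * m) : Nat) : Int) + ((2 * m : Nat) : Int)))).toList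
          = (lijn.toList.drop (k * (2 * m))).take (2 * m) := toList_slice_nat lijn _ _
      rw [hz, List.length_take, List.length_drop, hn]
      have hmin : min (2 * m) (g * (2 * m) - k * (2 * m)) = 2 * m := by
        have h1 : (k + 1) * (2 * m) ≤ g * (2 * m) := Nat.mul_le_mul_right _ (by omega)
        have h2 : k * (2 * m) + 2 * m = (k + 1) * (2 * m) := by ring
        omega
      rw [hmin, pyRange_two_eq, List.map_map]
      apply List.map_congr_left
      intro t ht
      rw [List.mem_range] at ht
      apply String.toList_inj.mp
      simp only [Function.comp]
      rw [toList_slice_nat2, toList_slice_nat2, hz]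
      rw [List.drop_take, List.drop_drop, List.take_take]
      have hidx : k * (2 * m) + 2 * t = 2 * (k * m + t) := by ring
      have hmin2 : min 2 (2 * m - 2 * t) = 2 := by omega
      rw [hidx, hmin2]
    have hB : crossSection_alt getal lijn
        = (List.range g).map (fun k => (List.range m).map (fun t =>
            PySem.Str.slice lijn (some ((2 * (k * m + t) : Nat) : Int))
              (some (((2 * (k * m + t) : Nat) : Int) + 2)))) := by
      have hn2 : (lijn.toList.length : Int) = ((2 * (g * m) : Nat) : Int) := by
        rw [hn]; push_cast; ring
      simp only [crossSection_alt, PySem.Str.len_eq, hseg, hhalf]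
      simp only [hn2, pyRange_two_eq, PySem.List.pyRange_one, hgt, List.map_map]
      apply List.map_congr_left
      intro k hk
      rw [List.mem_range] at hk
      simp only [Function.comp, zero_add]
      have e2 : ((k : Int)) * ((m : Nat) : Int) = ((k * m : Nat) : Int) := by push_cast; ring
      have e3 : ((k : Int) + 1) * ((m : Nat) : Int) = ((k * m : Nat) : Int) + ((m : Nat) : Int) := by
        push_cast; ring
      rw [e2, e3, PySem.List.slice_natCast_add]
      rw [map_range_drop_take _ (g * m) (k * m) m (by nlinarith)]
      apply List.map_congr_left
      intro t _
      simp [Function.comp]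
    rw [hA, hB]
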